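-- pv_equiv track=rewrite | github.com/edart76/treegraph | ui/lib.py | returnLines
-- ===== SOURCE A (Python) =====
-- def returnLines(text=""):
-- 	"""returns text split by newline characters
-- 	probably inefficient"""
-- 	newIndices = [0]
-- 	for i, char in enumerate(text):
-- 		if char != "\n":
-- 			continue
-- 		newIndices.append(i)
--
-- 	lines = []
-- 	newIndices.append(-1)
-- 	for i, v in enumerate(newIndices[:-1]):
-- 		lines.append(text[ v : newIndices[i+1] ])
-- 	return lines
-- ===== SOURCE B (Python) =====
-- def returnLines(text=""):
-- 	"""returns text split by newline characters
-- 	probably inefficient"""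
-- 	lines = []
-- 	start = 0
-- 	for i, char in enumerate(text):
-- 		if char == "\n":
-- 			lines.append(text[start:i])
-- 			start = i
-- 	lines.append(text[start:-1])
-- 	return lines
-- ===== Notes on version B (the rewrite author's own statement) =====
-- stated objective: simpler
-- what changed: B drops A's intermediate newline-index table and second slicing loop, building segments in a single pass with a start cursor that appends text[start:i] at each newline and text[start:-1] at the end.
import Mathlib
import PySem

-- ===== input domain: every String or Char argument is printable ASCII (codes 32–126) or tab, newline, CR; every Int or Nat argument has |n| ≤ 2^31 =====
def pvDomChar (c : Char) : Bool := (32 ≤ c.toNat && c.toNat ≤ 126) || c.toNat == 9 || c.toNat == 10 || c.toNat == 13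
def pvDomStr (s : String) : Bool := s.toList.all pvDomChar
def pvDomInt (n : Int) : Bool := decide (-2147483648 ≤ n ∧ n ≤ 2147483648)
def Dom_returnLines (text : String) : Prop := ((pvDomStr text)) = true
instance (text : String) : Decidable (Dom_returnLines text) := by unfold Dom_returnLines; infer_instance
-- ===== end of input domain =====

-- B replaces A's two-pass newline-index table with a single cursor-based pass (same cost, simpler decomposition).

-- ===== PORT A =====
def returnLines (text : String) : List String :=
  let cs := text.toList
  let newIndices :=
    (PySem.List.enumerate cs).foldl
      (fun acc p => if p.2 ≠ '\n' then acc else acc ++ [p.1]) ([0] : List Int)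
  let ni := newIndices ++ [(-1 : Int)]
  (PySem.List.enumerate (PySem.List.slice ni none (some (-1)))).foldl
    (fun lines p =>
      lines ++ [String.mk (PySem.List.slice cs (some p.2)
        (some (PySem.List.pyGetD ni (p.1 + 1) 0)))]) []

-- ===== PORT B =====
def returnLines_alt (text : String) : List String :=
  let cs := text.toList
  let st := (PySem.List.enumerate cs).foldl
    (fun (s : List String × Int) p =>
      if p.2 = '\n' then
        (s.1 ++ [String.mk (PySem.List.slice cs (some s.2) (some p.1))], p.1)
      else s)
    (([] : List String), (0 : Int))
  st.1 ++ [String.mk (PySem.List.slice cs (some st.2) (some (-1)))]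

-- ===== PRECONDITION & SPEC =====
def Spec_returnLines (text : String) (out : List String) : Prop := out = returnLines_alt text
instance (text : String) (out : List String) : Decidable (Spec_returnLines text out) := by unfold Spec_returnLines; infer_instance

-- ===== CLAIM (what is proved, stated in full; the proofs are below) =====
def Claim_equal_returnLines : Prop := ∀ (text : String), Dom_returnLines text → Spec_returnLines text (returnLines text)

-- ===== LEMMAS AND PROOFS =====

/-- newline positions of `t`, positions counted from `j` -/
def pvNl : List Char → Int → List Int
  | [], _ => []
  | c :: t, j => if c = '\n' then j :: pvNl t (j + 1) else pvNl t (j + 1)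

/-- segments between consecutive indices -/
def pvSegs (cs : List Char) : List Int → List String
  | a :: b :: rest => String.mk (PySem.List.slice cs (some a) (some b)) :: pvSegs cs (b :: rest)
  | _ => []

/-- last element with a default head -/
def pvLastD (a : Int) : List Int → Int
  | [] => a
  | x :: xs => pvLastD x xs

theorem pvA1 (t : List Char) : ∀ (j : Int) (acc : List Int),
    (PySem.List.enumerate t j).foldl
      (fun acc p => if p.2 ≠ '\n' then acc else acc ++ [p.1]) acc
    = acc ++ pvNl t j := by
  induction t with
  | nil => intro j acc; simp [PySem.List.enumerate, pvNl]
  | cons c t ih =>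
      intro j acc
      simp only [PySem.List.enumerate, List.foldl]
      by_cases h : c = '\n'
      · rw [if_neg (show ¬(c ≠ '\n') by simp [h]), ih (j + 1) (acc ++ [j])]
        simp [pvNl, h]
      · rw [if_pos h, ih (j + 1) acc]
        simp [pvNl, h]

theorem pvA2 (cs : List Char) (ni : List Int) :
    ∀ (suf pre : List Int), ni = pre ++ suf →
    ∀ (acc : List String),
    (PySem.List.enumerate suf.dropLast (pre.length : Int)).foldl
      (fun lines p => lines ++ [String.mk (PySem.List.slice cs (some p.2)
        (some (PySem.List.pyGetD ni (p.1 + 1) 0)))]) acc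
    = acc ++ pvSegs cs suf := by
  intro suf
  induction suf with
  | nil => intro pre _ acc; simp [pvSegs]
  | cons a rest ih =>
      cases rest with
      | nil => intro pre _ acc; simp [pvSegs]
      | cons b rest' =>
          intro pre hni acc
          have hidx : PySem.List.pyGetD ni ((pre.length : Int) + 1) 0 = b := by
            subst hni
            have h1 : ((pre.length : Int) + 1) = ((pre.length + 1 : Nat) : Int) := by push_cast; ring
            rw [h1, PySem.List.pyGetD_natCast]
            simp [List.getD]
          rw [show (a :: b :: rest').dropLast = a :: (b :: rest').dropLast from rfl]
          simp only [PySem.List.enumerate, List.foldl, hidx]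
          have hrec := ih (pre ++ [a]) (by simp [hni])
            (acc ++ [String.mk (PySem.List.slice cs (some a) (some b))])
          simp only [List.length_append, List.length_cons, List.length_nil, Nat.cast_add,
            Nat.cast_one, zero_add] at hrec
          rw [hrec, show pvSegs cs (a :: b :: rest')
            = String.mk (PySem.List.slice cs (some a) (some b)) :: pvSegs cs (b :: rest') from rfl]
          simp

theorem pvB1 (cs : List Char) (t : List Char) :
    ∀ (j : Int) (acc : List String) (start : Int),
    (PySem.List.enumerate t j).foldl
      (fun (s : List String × Int) p =>
        if p.2 = '\n' then
          (s.1 ++ [String.mk (PySem.List.slice cs (some s.2) (some p.1))], p.1)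
        else s)
      (acc, start)
    = (acc ++ pvSegs cs (start :: pvNl t j), pvLastD start (pvNl t j)) := by
  induction t with
  | nil => intro j acc start; simp [PySem.List.enumerate, pvNl, pvSegs, pvLastD]
  | cons c t ih =>
      intro j acc start
      by_cases h : c = '\n'
      · simp only [PySem.List.enumerate, List.foldl, pvNl, if_pos h]
        rw [ih (j + 1) (acc ++ [String.mk (PySem.List.slice cs (some start) (some j))]) j]
        simp [pvSegs, pvLastD]
      · simp only [PySem.List.enumerate, List.foldl, pvNl, if_neg h]
        rw [ih (j + 1) acc start]

theorem pvSegs_concat (cs : List Char) : ∀ (xs : List Int) (a z : Int),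
    pvSegs cs (a :: (xs ++ [z]))
    = pvSegs cs (a :: xs) ++ [String.mk (PySem.List.slice cs (some (pvLastD a xs)) (some z))] := by
  intro xs
  induction xs with
  | nil => intro a z; simp [pvSegs, pvLastD]
  | cons b rest ih =>
      intro a z
      simp only [List.cons_append, pvSegs, pvLastD, ih b z]

-- ===== VERDICT (by name: the statement is the Claim_ definition above) =====
theorem returnLines_spec : Claim_equal_returnLines := by
  intro text _
  unfold Spec_returnLines returnLines returnLines_alt
  simp only []
  set cs := text.toList with hcs
  rw [pvA1 cs 0 [0]]
  simp only [List.cons_append, List.nil_append]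
  have hdl : ((0 : Int) :: (pvNl cs 0 ++ [(-1 : Int)])).dropLast = 0 :: pvNl cs 0 := by
    rw [show (0 : Int) :: (pvNl cs 0 ++ [(-1 : Int)]) = (0 :: pvNl cs 0) ++ [(-1 : Int)] from rfl,
      List.dropLast_concat]
  rw [show PySem.List.slice ((0 : Int) :: (pvNl cs 0 ++ [(-1 : Int)])) none (some (-1))
        = 0 :: pvNl cs 0 from by rw [PySem.List.slice_to_neg_one, hdl]]
  have hA := pvA2 cs ((0 : Int) :: (pvNl cs 0 ++ [(-1 : Int)]))
      ((0 : Int) :: (pvNl cs 0 ++ [(-1 : Int)])) [] (by simp) []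
  simp only [List.length_nil, Nat.cast_zero] at hA
  rw [hdl] at hA
  rw [hA, pvB1 cs cs 0 [] 0]
  rw [pvSegs_concat cs (pvNl cs 0) 0 (-1)]
  simp
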